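-- pv_equiv track=rewrite | github.com/HAAIL-Universe/AgentZero | challenges/C021_package_manager/package_manager.py | _split_and
-- ===== SOURCE A (Python) =====
-- def _split_and(spec: str) -> list[str]:
--     """Split space-separated constraints, keeping operators with their versions."""
--     parts = []
--     current = ''
--     tokens = spec.split()
--     for t in tokens:
--         if t and t[0] in '>=<^~!' and current:
--             parts.append(current.strip())
--             current = t
--         elif current:
--             current += ' ' + t
--         else:
--             current = t
--     if current:
--         parts.append(current.strip())
--     return parts
-- ===== SOURCE B (Python) =====
-- def _split_and(spec: str) -> list[str]:
--     """Split space-separated constraints, keeping operators with their versions."""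
--     tokens = spec.split()
--     if not tokens:
--         return []
--     starts = [0] + [i for i, t in enumerate(tokens) if i > 0 and t[0] in '>=<^~!']
--     ends = starts[1:] + [len(tokens)]
--     return [' '.join(tokens[s:e]) for s, e in zip(starts, ends)]
-- ===== Notes on version B (the rewrite author's own statement) =====
-- stated objective: alternative
-- what changed: A's single pass with a running-string accumulator, flush-on-operator and final flush is replaced by a two-phase index-table-then-slice structure: compute the group-start indices (0 plus every position whose token starts with an operator character), then join the token slices between consecutive starts.
import Mathlib
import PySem

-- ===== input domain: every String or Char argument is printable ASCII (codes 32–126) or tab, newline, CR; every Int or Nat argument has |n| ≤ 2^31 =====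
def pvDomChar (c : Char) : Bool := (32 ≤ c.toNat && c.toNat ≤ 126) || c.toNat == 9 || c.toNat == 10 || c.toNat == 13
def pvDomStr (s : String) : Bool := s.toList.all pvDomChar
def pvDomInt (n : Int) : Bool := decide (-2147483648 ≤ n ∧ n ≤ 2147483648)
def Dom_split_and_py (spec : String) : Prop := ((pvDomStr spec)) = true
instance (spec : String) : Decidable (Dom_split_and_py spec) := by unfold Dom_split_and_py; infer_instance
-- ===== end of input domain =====

-- B replaces A's running-string accumulator with a two-phase index-table-then-slice decomposition (objective: alternative, same cost).

-- `t and t[0] in '>=<^~!'` — the empty string is falsy, otherwise membership of the first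
-- character in the six-character operator string (exact: singleton-char membership).
def pvIsOp (t : List Char) : Bool :=
  match t with
  | [] => false
  | c :: _ => decide (c ∈ ['>', '=', '<', '^', '~', '!'])

-- ===== PORT A =====
-- loop body of A's `for t in tokens` (state = (parts, current))
def pvStepA (st : List (List Char) × List Char) (t : List Char) : List (List Char) × List Char :=
  if pvIsOp t && !st.2.isEmpty then (st.1 ++ [PySem.Chars.strip st.2], t)
  else if !st.2.isEmpty then (st.1, st.2 ++ ' ' :: t)
  else (st.1, t)

def split_and_py (spec : String) : List String :=
  let tokens := PySem.Chars.split₀ spec.toList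
  let st := tokens.foldl pvStepA ([], [])
  ((if !st.2.isEmpty then st.1 ++ [PySem.Chars.strip st.2] else st.1).map String.ofList)

-- ===== PORT B =====
def split_and_py_alt (spec : String) : List String :=
  let tokens := PySem.Chars.split₀ spec.toList
  if tokens.isEmpty then []
  else
    let starts : List Int :=
      0 :: ((PySem.List.enumerate tokens 0).filter
              (fun p => decide (0 < p.1) && pvIsOp p.2)).map (·.1)
    let ends : List Int := starts.tail ++ [(tokens.length : Int)]
    ((starts.zip ends).map (fun p =>
        PySem.Chars.join [' '] (PySem.List.slice tokens (some p.1) (some p.2)))).map String.ofList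

-- ===== PRECONDITION & SPEC =====
def Spec_split_and_py (spec : String) (out : List String) : Prop := out = split_and_py_alt spec
instance (spec : String) (out : List String) : Decidable (Spec_split_and_py spec out) := by unfold Spec_split_and_py; infer_instance

-- ===== CLAIM (what is proved, stated in full; the proofs are below) =====
def Claim_equal_split_and_py : Prop := ∀ (spec : String), Dom_split_and_py spec → Spec_split_and_py spec (split_and_py spec)

-- ===== LEMMAS AND PROOFS =====

-- a token produced by str.split(): nonempty and whitespace-free
def pvClean (t : List Char) : Prop := t ≠ [] ∧ ∀ c ∈ t, PySem.Chars.isspace c = false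

-- positions of operator-headed tokens
def pvOpIdxs : List (List Char) → List Nat
  | [] => []
  | t :: rest => (if pvIsOp t then [0] else []) ++ (pvOpIdxs rest).map (· + 1)

-- chunk a list at (relative) cut positions
def pvPieces : List Nat → List (List Char) → List (List (List Char))
  | [], ts => [ts]
  | c :: cs, ts => ts.take c :: pvPieces (cs.map (· - c)) (ts.drop c)
termination_by cs _ => cs.length
decreasing_by simp

-- grouping, carried as a list of token groups
def pvGaux : List (List Char) → List (List Char) → List (List (List Char))
  | g, [] => [g]
  | g, t :: rest => if pvIsOp t then g :: pvGaux [t] rest else pvGaux (g ++ [t]) rest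

lemma split₀_go_clean (s : List Char) :
    ∀ (cur : List Char) (acc : List (List Char)),
      (∀ c ∈ cur, PySem.Chars.isspace c = false) →
      (∀ t ∈ acc, pvClean t) →
      ∀ t ∈ PySem.Chars.split₀.go s cur acc, pvClean t := by
  induction s with
  | nil =>
      intro cur acc hcur hacc t ht
      simp only [PySem.Chars.split₀.go] at ht
      by_cases hc : cur.isEmpty
      · simp [hc] at ht; exact hacc t ht
      · simp [hc] at ht
        rcases ht with h | h
        · exact hacc t h
        · subst h
          refine ⟨by simpa using (by simpa [List.isEmpty_iff] using hc), ?_⟩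
          intro c hc'; exact hcur c (by simpa using hc')
  | cons c rest ih =>
      intro cur acc hcur hacc t ht
      simp only [PySem.Chars.split₀.go] at ht
      by_cases hs : PySem.Chars.isspace c
      · by_cases hc : cur.isEmpty
        · simp [hs, hc] at ht
          exact ih [] acc (by simp) hacc t ht
        · simp [hs, hc] at ht
          refine ih [] (cur.reverse :: acc) (by simp) ?_ t ht
          intro u hu
          rcases List.mem_cons.mp hu with hu | hu
          · subst hu
            refine ⟨by simpa using (by simpa [List.isEmpty_iff] using hc), ?_⟩
            intro d hd; exact hcur d (by simpa using hd)
          · exact hacc u hu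
      · simp [hs] at ht
        refine ih (c :: cur) acc ?_ hacc t ht
        intro d hd
        rcases List.mem_cons.mp hd with hd | hd
        · subst hd; simpa using hs
        · exact hcur d hd

lemma split₀_clean (s : List Char) : ∀ t ∈ PySem.Chars.split₀ s, pvClean t :=
  split₀_go_clean s [] [] (by simp) (by simp)

lemma join_ne_nil (g : List (List Char)) (hg : g ≠ []) (hc : ∀ t ∈ g, t ≠ []) :
    PySem.Chars.join [' '] g ≠ [] := by
  cases g with
  | nil => exact absurd rfl hg
  | cons a g' =>
      cases g' with
      | nil => simpa [PySem.Chars.join_singleton] using hc a (by simp)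
      | cons b g'' =>
          rw [PySem.Chars.join_cons_cons]
          have : a ≠ [] := hc a (by simp)
          simp [this]

lemma join_append_singleton (g : List (List Char)) (t : List Char) (hg : g ≠ []) :
    PySem.Chars.join [' '] (g ++ [t]) = PySem.Chars.join [' '] g ++ ' ' :: t := by
  induction g with
  | nil => exact absurd rfl hg
  | cons a g' ih =>
      cases g' with
      | nil => simp [PySem.Chars.join_cons_cons, PySem.Chars.join_singleton]
      | cons b g'' =>
          have hih := ih (by simp)
          rw [show ((a :: b :: g'') ++ [t] : List (List Char)) = a :: b :: (g'' ++ [t]) by simp,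
              PySem.Chars.join_cons_cons,
              show (b :: (g'' ++ [t]) : List (List Char)) = (b :: g'') ++ [t] by simp,
              hih, PySem.Chars.join_cons_cons]
          simp

lemma join_head? (a : List Char) (g : List (List Char)) (ha : a ≠ []) :
    (PySem.Chars.join [' '] (a :: g)).head? = a.head? := by
  cases g with
  | nil => rw [PySem.Chars.join_singleton]
  | cons b g' =>
      rw [PySem.Chars.join_cons_cons, List.append_assoc, List.head?_append]
      cases a with
      | nil => exact absurd rfl ha
      | cons c cs => simp

lemma join_getLast? (g : List (List Char)) (hg : g ≠ []) (hc : ∀ t ∈ g, t ≠ []) :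
    (PySem.Chars.join [' '] g).getLast? = (g.getLast hg).getLast? := by
  induction g with
  | nil => exact absurd rfl hg
  | cons a g' ih =>
      cases g' with
      | nil => rw [PySem.Chars.join_singleton]; simp
      | cons b g'' =>
          rw [PySem.Chars.join_cons_cons, List.append_assoc, List.getLast?_append]
          have hne : PySem.Chars.join [' '] (b :: g'') ≠ [] :=
            join_ne_nil _ (by simp) (fun t ht => hc t (by simp [ht]))
          have h1 : ([' '] ++ PySem.Chars.join [' '] (b :: g'')).getLast? =
              (PySem.Chars.join [' '] (b :: g'')).getLast? := by
            rw [List.getLast?_append]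
            cases h : (PySem.Chars.join [' '] (b :: g'')).getLast? with
            | none => exact absurd (List.getLast?_eq_none_iff.mp h) hne
            | some x => simp
          rw [h1, ih (by simp) (fun t ht => hc t (by simp [ht]))]
          have : (b :: g'').getLast (by simp) = ((a :: b :: g'').getLast (by simp)) := by
            simp [List.getLast_cons]
          rw [this]
          cases h : ((a :: b :: g'').getLast (by simp)).getLast? with
          | none =>
              exfalso
              have : (a :: b :: g'').getLast (by simp) ≠ [] :=
                hc _ (List.getLast_mem _)
              exact this (List.getLast?_eq_none_iff.mp h)
          | some x => simp

lemma dropWhile_head (l : List Char) (c : Char)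
    (hh : l.head? = some c) (hcs : PySem.Chars.isspace c = false) :
    l.dropWhile PySem.Chars.isspace = l := by
  cases l with
  | nil => simp at hh
  | cons x xs =>
      have : x = c := by simpa using hh
      subst this
      exact List.dropWhile_cons_of_neg (by simp [hcs])

lemma strip_of_ends (l : List Char) (c b : Char)
    (hh : l.head? = some c) (hcs : PySem.Chars.isspace c = false)
    (hl : l.getLast? = some b) (hbs : PySem.Chars.isspace b = false) :
    PySem.Chars.strip l = l := by
  unfold PySem.Chars.strip PySem.Chars.lstrip PySem.Chars.rstrip
  rw [dropWhile_head l c hh hcs,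
      dropWhile_head l.reverse b (by rw [List.head?_reverse]; exact hl) hbs,
      List.reverse_reverse]

lemma strip_join (g : List (List Char)) (hg : g ≠ []) (hc : ∀ t ∈ g, pvClean t) :
    PySem.Chars.strip (PySem.Chars.join [' '] g) = PySem.Chars.join [' '] g ∧
    PySem.Chars.join [' '] g ≠ [] := by
  have hnn : ∀ t ∈ g, t ≠ [] := fun t ht => (hc t ht).1
  have hne := join_ne_nil g hg hnn
  refine ⟨?_, hne⟩
  cases g with
  | nil => exact absurd rfl hg
  | cons a g' =>
      have ha : a ≠ [] := hnn a (by simp)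
      obtain ⟨c, cs, rfl⟩ : ∃ c cs, a = c :: cs := by
        cases a with
        | nil => exact absurd rfl ha
        | cons c cs => exact ⟨c, cs, rfl⟩
      have hh : (PySem.Chars.join [' '] ((c :: cs) :: g')).head? = some c := by
        rw [join_head? _ _ ha]; rfl
      have hlast := join_getLast? ((c :: cs) :: g') (by simp) hnn
      have hmem : ((c :: cs) :: g').getLast (by simp) ∈ (c :: cs) :: g' :=
        List.getLast_mem _
      have hlne : ((c :: cs) :: g').getLast (by simp) ≠ [] := hnn _ hmem
      obtain ⟨b, hb⟩ : ∃ b, (((c :: cs) :: g').getLast (by simp)).getLast? = some b := by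
        cases h : (((c :: cs) :: g').getLast (by simp)).getLast? with
        | none => exact absurd (List.getLast?_eq_none_iff.mp h) hlne
        | some x => exact ⟨x, rfl⟩
      have hbmem : b ∈ ((c :: cs) :: g').getLast (by simp) := by
        have := List.getLast?_eq_some_iff.mp hb
        obtain ⟨l', hl'⟩ := this
        rw [hl']; simp
      refine strip_of_ends _ c b hh ?_ (by rw [hlast]; exact hb) ?_
      · exact (hc (c :: cs) (by simp)).2 c (by simp)
      · exact (hc (((c :: cs) :: g').getLast (by simp)) hmem).2 b hbmem

-- ===== A-side characterization =====

lemma aLoop (ts : List (List Char)) :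
    ∀ (parts : List (List Char)) (g : List (List Char)),
      (∀ t ∈ ts, pvClean t) → g ≠ [] → (∀ t ∈ g, pvClean t) →
      (let st := ts.foldl pvStepA (parts, PySem.Chars.join [' '] g)
       if !st.2.isEmpty then st.1 ++ [PySem.Chars.strip st.2] else st.1)
        = parts ++ (pvGaux g ts).map (PySem.Chars.join [' ']) := by
  induction ts with
  | nil =>
      intro parts g _ hg hc
      obtain ⟨hs, hne⟩ := strip_join g hg hc
      simp [pvGaux, hne, hs]
  | cons t ts' ih =>
      intro parts g hts hg hc
      obtain ⟨hs, hne⟩ := strip_join g hg hc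
      have hct : pvClean t := hts t (by simp)
      have hts' : ∀ u ∈ ts', pvClean u := fun u hu => hts u (by simp [hu])
      simp only [List.foldl_cons]
      by_cases hop : pvIsOp t
      · have hstep : pvStepA (parts, PySem.Chars.join [' '] g) t =
            (parts ++ [PySem.Chars.join [' '] g], PySem.Chars.join [' '] [t]) := by
          simp [pvStepA, hop, hne, hs, PySem.Chars.join_singleton]
        rw [hstep, ih (parts ++ [PySem.Chars.join [' '] g]) [t] hts' (by simp)
              (by intro u hu; simp at hu; subst hu; exact hct)]
        simp [pvGaux, hop]
      · have hstep : pvStepA (parts, PySem.Chars.join [' '] g) t =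
            (parts, PySem.Chars.join [' '] (g ++ [t])) := by
          simp [pvStepA, hop, hne, join_append_singleton g t hg]
        rw [hstep, ih parts (g ++ [t]) hts' (by simp)
              (by intro u hu; rcases List.mem_append.mp hu with h | h
                  · exact hc u h
                  · simp at h; subst h; exact hct)]
        simp [pvGaux, hop]

lemma a_char (spec : String) :
    split_and_py spec =
      (match PySem.Chars.split₀ spec.toList with
        | [] => ([] : List (List (List Char)))
        | t :: rest => pvGaux [t] rest).map
        (fun g => String.ofList (PySem.Chars.join [' '] g)) := by
  unfold split_and_py
  have hclean := split₀_clean spec.toList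
  cases hts : PySem.Chars.split₀ spec.toList with
  | nil => simp
  | cons t rest =>
      have hct : pvClean t := hclean t (by rw [hts]; simp)
      have hrest : ∀ u ∈ rest, pvClean u := fun u hu => hclean u (by rw [hts]; simp [hu])
      simp only [List.foldl_cons]
      have hstep : pvStepA ([], []) t = ([], PySem.Chars.join [' '] [t]) := by
        simp [pvStepA, PySem.Chars.join_singleton]
      rw [hstep]
      have := aLoop rest [] [t] hrest (by simp)
        (by intro u hu; simp at hu; subst hu; exact hct)
      simp only at this
      rw [this]
      simp [List.map_map, Function.comp_def]

-- ===== B-side characterization =====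

lemma opIdxs_sorted (xs : List (List Char)) :
    (pvOpIdxs xs).Pairwise (· < ·) ∧ ∀ c ∈ pvOpIdxs xs, c < xs.length := by
  induction xs with
  | nil => simp [pvOpIdxs]
  | cons t xs' ih =>
      obtain ⟨hp, hb⟩ := ih
      have hpm : ((pvOpIdxs xs').map (· + 1)).Pairwise (· < ·) := by
        rw [List.pairwise_map]; exact hp.imp (fun h => by omega)
      have hbm : ∀ c ∈ (pvOpIdxs xs').map (· + 1), c < (t :: xs').length := by
        intro c hc
        obtain ⟨i, hi, rfl⟩ := List.mem_map.mp hc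
        have := hb i hi; simp; omega
      by_cases hop : pvIsOp t
      · refine ⟨?_, ?_⟩
        · simp only [pvOpIdxs, hop, if_pos, List.singleton_append]
          exact List.pairwise_cons.mpr
            ⟨fun c hc => by obtain ⟨i, _, rfl⟩ := List.mem_map.mp hc; omega, hpm⟩
        · intro c hc
          simp only [pvOpIdxs, hop, if_pos, List.singleton_append] at hc
          rcases List.mem_cons.mp hc with rfl | hc
          · simp
          · exact hbm c hc
      · constructor
        · simpa [pvOpIdxs, hop] using hpm
        · intro c hc; exact hbm c (by simpa [pvOpIdxs, hop] using hc)

lemma enumFilter (xs : List (List Char)) :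
    ∀ (s : Int), 0 < s →
      ((PySem.List.enumerate xs s).filter
          (fun p => decide (0 < p.1) && pvIsOp p.2)).map (·.1)
        = (pvOpIdxs xs).map (fun (i : Nat) => s + (i : Int)) := by
  induction xs with
  | nil => intro s _; simp [PySem.List.enumerate, pvOpIdxs]
  | cons t xs' ih =>
      intro s hs
      have hcons : PySem.List.enumerate (t :: xs') s = (s, t) :: PySem.List.enumerate xs' (s + 1) := rfl
      rw [hcons]
      have ihs := ih (s + 1) (by omega)
      by_cases hop : pvIsOp t
      · rw [List.filter_cons_of_pos (by simp [hop, hs]), List.map_cons, ihs]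
        simp only [pvOpIdxs, hop, if_pos, List.singleton_append, List.map_cons,
          List.map_map]
        refine List.cons_eq_cons.mpr ⟨by simp, ?_⟩
        apply List.map_congr_left; intro i _
        simp only [Function.comp_apply]; push_cast; ring
      · rw [List.filter_cons_of_neg (by simp [hop]), ihs]
        simp only [pvOpIdxs, hop, Bool.false_eq_true, if_false,
          List.nil_append, List.map_map]
        apply List.map_congr_left; intro i _
        simp only [Function.comp_apply]; push_cast; ring

lemma zipSlice (cs : List Nat) :
    ∀ (o : Nat) (ts : List (List Char)),
      (o :: cs).Pairwise (· < ·) → o ≤ ts.length → (∀ c ∈ cs, c ≤ ts.length) →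
      ((o :: cs).zip (cs ++ [ts.length])).map
          (fun p => (ts.drop p.1).take (p.2 - p.1))
        = pvPieces (cs.map (· - o)) (ts.drop o) := by
  induction cs with
  | nil =>
      intro o ts _ ho _
      simp only [List.nil_append, List.zip_cons_cons, List.zip_nil_right,
        List.map_cons, List.map_nil, pvPieces, List.map_nil]
      rw [List.take_of_length_le (by simp)]
  | cons c cs' ih =>
      intro o ts hp ho hb
      have hoc : o < c := (List.pairwise_cons.mp hp).1 c (by simp)
      have hcb : c ≤ ts.length := hb c (by simp)
      have hp' : (c :: cs').Pairwise (· < ·) := (List.pairwise_cons.mp hp).2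
      have hcx : ∀ x ∈ cs', c < x := (List.pairwise_cons.mp hp').1
      have ihc := ih c ts hp' hcb (fun x hx => hb x (by simp [hx]))
      simp only [List.cons_append, List.zip_cons_cons, List.map_cons]
      rw [ihc]
      simp only [pvPieces]
      congr 1
      rw [List.drop_drop, show o + (c - o) = c by omega, List.map_map]
      congr 1
      apply List.map_congr_left
      intro x hx
      have := hcx x hx
      simp only [Function.comp_apply]
      omega

lemma pieces_gaux (rest : List (List Char)) :
    ∀ (pre : List (List Char)), pre ≠ [] →
      pvPieces ((pvOpIdxs rest).map (· + pre.length)) (pre ++ rest) = pvGaux pre rest := by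
  induction rest with
  | nil => intro pre _; simp [pvOpIdxs, pvPieces, pvGaux]
  | cons t rest' ih =>
      intro pre hpre
      by_cases hop : pvIsOp t
      · simp only [pvOpIdxs, hop, if_pos, List.singleton_append, List.map_cons,
          List.map_map, Nat.zero_add]
        simp only [pvPieces]
        rw [List.take_left, List.drop_left]
        have hmap : ((pvOpIdxs rest').map ((fun x => x + pre.length) ∘ fun x => x + 1)).map (· - pre.length)
            = (pvOpIdxs rest').map (· + 1) := by
          rw [List.map_map]; apply List.map_congr_left; intro i _
          simp only [Function.comp_apply]; omega
        rw [hmap]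
        have := ih [t] (by simp)
        simp only [List.length_cons, List.length_nil, Nat.zero_add, List.singleton_append] at this
        rw [this]
        simp [pvGaux, hop]
      · have hx : pvOpIdxs (t :: rest') = (pvOpIdxs rest').map (· + 1) := by
          simp [pvOpIdxs, hop]
        have hmap : (pvOpIdxs rest').map ((fun x => x + pre.length) ∘ fun x => x + 1)
            = (pvOpIdxs rest').map (· + (pre ++ [t]).length) := by
          apply List.map_congr_left; intro i _
          simp only [Function.comp_apply, List.length_append, List.length_cons, List.length_nil]
          omega
        rw [hx, List.map_map, hmap, show pre ++ t :: rest' = (pre ++ [t]) ++ rest' by simp,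
            ih (pre ++ [t]) (by simp)]
        simp [pvGaux, hop]

lemma b_char (spec : String) :
    split_and_py_alt spec =
      (match PySem.Chars.split₀ spec.toList with
        | [] => ([] : List (List (List Char)))
        | t :: rest => pvGaux [t] rest).map
        (fun g => String.ofList (PySem.Chars.join [' '] g)) := by
  unfold split_and_py_alt
  cases hts : PySem.Chars.split₀ spec.toList with
  | nil => simp
  | cons t rest =>
      simp only [List.isEmpty_cons, Bool.false_eq_true, if_false]
      have hcons : PySem.List.enumerate (t :: rest) 0 = (0, t) :: PySem.List.enumerate rest 1 := rfl
      have hfilt : ((PySem.List.enumerate (t :: rest) 0).filter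
          (fun p => decide (0 < p.1) && pvIsOp p.2)).map (·.1)
          = (pvOpIdxs rest).map (fun (i : Nat) => 1 + (i : Int)) := by
        rw [hcons, List.filter_cons_of_neg (by simp)]
        exact enumFilter rest 1 (by omega)
      set cs : List Nat := (pvOpIdxs rest).map (· + 1) with hcs
      have hcast : (pvOpIdxs rest).map (fun (i : Nat) => 1 + (i : Int))
          = cs.map (fun (n : Nat) => (n : Int)) := by
        rw [hcs, List.map_map]
        apply List.map_congr_left; intro i _
        simp only [Function.comp_apply]; push_cast; ring
      rw [hfilt, hcast]
      simp only [List.tail_cons]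
      have hstarts : ((0 : Int) :: cs.map (fun (n : Nat) => (n : Int)))
          = (0 :: cs).map (fun (n : Nat) => (n : Int)) := by simp
      have hends : cs.map (fun (n : Nat) => (n : Int)) ++ [((t :: rest).length : Int)]
          = (cs ++ [(t :: rest).length]).map (fun (n : Nat) => (n : Int)) := by simp
      rw [hstarts, hends, List.zip_map, List.map_map, List.map_map]
      have hfun : ∀ p ∈ (0 :: cs).zip (cs ++ [(t :: rest).length]),
          ((String.ofList ∘ fun p => PySem.Chars.join [' ']
              (PySem.List.slice (t :: rest) (some p.1) (some p.2))) ∘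
            Prod.map (fun (n : Nat) => (n : Int)) (fun (n : Nat) => (n : Int))) p
          = ((fun g => String.ofList (PySem.Chars.join [' '] g)) ∘
              (fun p : Nat × Nat => ((t :: rest).drop p.1).take (p.2 - p.1))) p := by
        intro p _
        obtain ⟨a, b⟩ := p
        simp only [Function.comp_apply, Prod.map_apply]
        rw [PySem.List.slice_natCast]
      rw [List.map_congr_left hfun]
      have hb : ∀ c ∈ cs, c ≤ (t :: rest).length := by
        intro c hc
        obtain ⟨i, hi, rfl⟩ := List.mem_map.mp hc
        have := (opIdxs_sorted rest).2 i hi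
        simp; omega
      have hpair : ((0 : Nat) :: cs).Pairwise (· < ·) := by
        refine List.pairwise_cons.mpr ⟨?_, ?_⟩
        · intro c hc; obtain ⟨i, _, rfl⟩ := List.mem_map.mp hc; omega
        · rw [hcs, List.pairwise_map]
          exact (opIdxs_sorted rest).1.imp (fun h => by omega)
      have hzs := zipSlice cs 0 (t :: rest) hpair (by simp) hb
      simp only [Nat.sub_zero, List.drop_zero] at hzs
      rw [show (cs.map fun x => x) = cs from by simp] at hzs
      have hpg : pvPieces cs (t :: rest) = pvGaux [t] rest := by
        have := pieces_gaux rest [t] (by simp)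
        simpa [hcs] using this
      rw [← List.map_map, hzs, hpg]

-- ===== VERDICT (by name: the statement is the Claim_ definition above) =====
theorem split_and_py_spec : Claim_equal_split_and_py := by
  intro spec _
  unfold Spec_split_and_py
  rw [a_char, b_char]
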